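-- pv_equiv track=rewrite | github.com/Prag1396/WebDev-Project | controllers/api.py | dataToBoolean
-- ===== SOURCE A (Python) =====
-- def dataToBoolean(data):
--     data_bool = [False,False,False,False,False,False]
--     for i in data:
--         if i == "community":
--             data_bool[0] = True
--         elif i == "women":
--             data_bool[1] = True
--         elif i == "foster":
--             data_bool[2] = True
--         elif i == "homelessness":
--             data_bool[3] = True
--         elif i == "health":
--             data_bool[4] = True
--         elif i == "senior":
--             data_bool[5] = True
--     return data_bool
-- ===== SOURCE B (Python) =====
-- def dataToBoolean(data):
--     categories = ["community", "women", "foster", "homelessness", "health", "senior"]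
--     items = list(data)
--     return [cat in items for cat in categories]
-- ===== Notes on version B (the rewrite author's own statement) =====
-- stated objective: idiomatic
-- what changed: B inverts the loop: instead of iterating over data and dispatching through an if/elif chain that flips slots of a mutable flag list, it iterates over the fixed category list and builds the result directly with a membership test per category.
import Mathlib
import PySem

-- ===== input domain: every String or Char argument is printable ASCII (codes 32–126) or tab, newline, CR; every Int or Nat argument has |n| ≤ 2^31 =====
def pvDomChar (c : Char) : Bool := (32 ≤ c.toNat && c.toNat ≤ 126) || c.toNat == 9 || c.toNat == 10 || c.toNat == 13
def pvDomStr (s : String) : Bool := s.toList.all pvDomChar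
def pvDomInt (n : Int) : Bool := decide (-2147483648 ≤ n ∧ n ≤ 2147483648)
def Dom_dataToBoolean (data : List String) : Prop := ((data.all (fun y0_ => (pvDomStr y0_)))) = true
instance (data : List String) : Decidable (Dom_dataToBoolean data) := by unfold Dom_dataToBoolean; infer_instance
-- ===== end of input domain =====

-- B inverts A's loop: it maps a membership test over the fixed category list (idiomatic; not faster).

-- ===== PORT A =====
-- A: loop over data, flipping slots of a 6-element flag list via an if/elif chain.
def dataToBooleanStep (db : List Bool) (i : String) : List Bool :=
  if i == "community" then db.set 0 true
  else if i == "women" then db.set 1 true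
  else if i == "foster" then db.set 2 true
  else if i == "homelessness" then db.set 3 true
  else if i == "health" then db.set 4 true
  else if i == "senior" then db.set 5 true
  else db

def dataToBoolean (data : List String) : List Bool :=
  data.foldl dataToBooleanStep [false, false, false, false, false, false]

-- ===== PORT B =====
-- B: membership test of each fixed category in the data.
def dataToBoolean_alt (data : List String) : List Bool :=
  let items := data
  ["community", "women", "foster", "homelessness", "health", "senior"].map
    (fun cat => items.contains cat)

-- ===== PRECONDITION & SPEC =====
def Spec_dataToBoolean (data : List String) (out : List Bool) : Prop := out = dataToBoolean_alt data
instance (data : List String) (out : List Bool) : Decidable (Spec_dataToBoolean data out) := by unfold Spec_dataToBoolean; infer_instance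

-- ===== CLAIM (what is proved, stated in full; the proofs are below) =====
def Claim_equal_dataToBoolean : Prop := ∀ (data : List String), Dom_dataToBoolean data → Spec_dataToBoolean data (dataToBoolean data)

-- ===== LEMMAS AND PROOFS =====

-- Invariant of A's fold: starting from any 6-bool accumulator, the result in slot k
-- is the initial flag OR-ed with membership of category k in the remaining data.
theorem dataToBoolean_fold_inv (data : List String) (b0 b1 b2 b3 b4 b5 : Bool) :
    data.foldl dataToBooleanStep [b0, b1, b2, b3, b4, b5]
    = [b0 || data.contains "community",
       b1 || data.contains "women",
       b2 || data.contains "foster",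
       b3 || data.contains "homelessness",
       b4 || data.contains "health",
       b5 || data.contains "senior"] := by
  induction data generalizing b0 b1 b2 b3 b4 b5 with
  | nil => simp
  | cons i rest ih =>
    rw [List.foldl_cons]
    by_cases h0 : i = "community"
    · subst h0
      have : dataToBooleanStep [b0, b1, b2, b3, b4, b5] "community"
          = [true, b1, b2, b3, b4, b5] := by simp [dataToBooleanStep, List.set]
      rw [this, ih]; simp
    · by_cases h1 : i = "women"
      · subst h1
        have : dataToBooleanStep [b0, b1, b2, b3, b4, b5] "women"
            = [b0, true, b2, b3, b4, b5] := by simp [dataToBooleanStep, List.set]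
        rw [this, ih]; simp
      · by_cases h2 : i = "foster"
        · subst h2
          have : dataToBooleanStep [b0, b1, b2, b3, b4, b5] "foster"
              = [b0, b1, true, b3, b4, b5] := by simp [dataToBooleanStep, List.set]
          rw [this, ih]; simp
        · by_cases h3 : i = "homelessness"
          · subst h3
            have : dataToBooleanStep [b0, b1, b2, b3, b4, b5] "homelessness"
                = [b0, b1, b2, true, b4, b5] := by simp [dataToBooleanStep, List.set]
            rw [this, ih]; simp
          · by_cases h4 : i = "health"
            · subst h4
              have : dataToBooleanStep [b0, b1, b2, b3, b4, b5] "health"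
                  = [b0, b1, b2, b3, true, b5] := by simp [dataToBooleanStep, List.set]
              rw [this, ih]; simp
            · by_cases h5 : i = "senior"
              · subst h5
                have : dataToBooleanStep [b0, b1, b2, b3, b4, b5] "senior"
                    = [b0, b1, b2, b3, b4, true] := by simp [dataToBooleanStep, List.set]
                rw [this, ih]; simp
              · have : dataToBooleanStep [b0, b1, b2, b3, b4, b5] i
                    = [b0, b1, b2, b3, b4, b5] := by
                  simp [dataToBooleanStep, h0, h1, h2, h3, h4, h5]
                rw [this, ih]
                simp [Ne.symm h0, Ne.symm h1, Ne.symm h2,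
                  Ne.symm h3, Ne.symm h4, Ne.symm h5]

-- ===== VERDICT (by name: the statement is the Claim_ definition above) =====
theorem dataToBoolean_spec : Claim_equal_dataToBoolean := by
  intro data _
  show dataToBoolean data = dataToBoolean_alt data
  rw [dataToBoolean, dataToBoolean_fold_inv]
  simp [dataToBoolean_alt]
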